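-- pv_equiv track=rewrite | github.com/GutKat/UFold | mlforensic_2.py | type_pairs
-- ===== SOURCE A (Python) =====
-- def type_pairs(pairs, sequence):
--     sequence = [i.upper() for i in sequence]
--
--     AU_pair = []
--     GC_pair = []
--     GU_pair = []
--     other_pairs = []
--     for i in pairs:
--         if [sequence[i[0] - 1], sequence[i[1] - 1]] in [["A", "U"], ["U", "A"]]:
--             AU_pair.append(i)
--         elif [sequence[i[0] - 1], sequence[i[1] - 1]] in [["G", "C"], ["C", "G"]]:
--             GC_pair.append(i)
--         elif [sequence[i[0] - 1], sequence[i[1] - 1]] in [["G", "U"], ["U", "G"]]: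
--             GU_pair.append(i)
--         else:
--             other_pairs.append(i)
--     watson_pairs_t = AU_pair + GC_pair
--     wobble_pairs_t = GU_pair
--     other_pairs_t = other_pairs
--     return watson_pairs_t, wobble_pairs_t, other_pairs_t
-- ===== SOURCE B (Python) =====
-- def type_pairs(pairs, sequence):
--     seq = sequence.upper()
--
--     def kind(p):
--         return seq[p[0] - 1] + seq[p[1] - 1]
--
--     au_list = [p for p in pairs if kind(p) in ("AU", "UA")]
--     gc_list = [p for p in pairs if kind(p) in ("GC", "CG")]
--     gu_list = [p for p in pairs if kind(p) in ("GU", "UG")]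
--     other = [p for p in pairs
--              if kind(p) not in ("AU", "UA", "GC", "CG", "GU", "UG")]
--     return au_list + gc_list, gu_list, other
-- ===== Notes on version B (the rewrite author's own statement) =====
-- stated objective: simpler
-- what changed: Replaces A's single accumulator loop over four mutable buckets (with per-character list conversion and elif chain) by uppercasing the string once and building each bucket with its own independent comprehension over pairs; 'other' is the explicit complement of the six matching two-character kinds. (the per-bucket comprehensions also run faster than A's interpreted per-element if/elif loop with its full list(sequence) conversion).
import Mathlib
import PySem

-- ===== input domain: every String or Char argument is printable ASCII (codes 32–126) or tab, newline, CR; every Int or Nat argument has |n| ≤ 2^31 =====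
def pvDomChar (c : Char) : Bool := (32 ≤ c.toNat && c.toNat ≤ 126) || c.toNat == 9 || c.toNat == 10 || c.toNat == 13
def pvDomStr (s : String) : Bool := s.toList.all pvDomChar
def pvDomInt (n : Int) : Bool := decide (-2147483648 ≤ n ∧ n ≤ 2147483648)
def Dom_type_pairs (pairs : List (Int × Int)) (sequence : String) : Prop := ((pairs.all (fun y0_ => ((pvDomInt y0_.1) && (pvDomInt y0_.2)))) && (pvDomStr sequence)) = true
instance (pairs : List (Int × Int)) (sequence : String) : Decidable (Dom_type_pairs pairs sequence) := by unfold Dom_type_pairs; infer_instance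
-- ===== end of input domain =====

-- B replaces A's single four-bucket accumulator loop by one uppercase pass and four independent filtering comprehensions (objective: simpler).


-- ===== PORT A =====
-- the pair of characters sequence[p[0]-1], sequence[p[1]-1] (Python indexing; none = IndexError)
def pvGet2 (seq : List Char) (p : Int × Int) : Option Char × Option Char :=
  (PySem.List.pyGet? seq (p.1 - 1), PySem.List.pyGet? seq (p.2 - 1))

def pvIsAU (c : Option Char × Option Char) : Bool :=
  (c == (some 'A', some 'U')) || (c == (some 'U', some 'A'))
def pvIsGC (c : Option Char × Option Char) : Bool :=
  (c == (some 'G', some 'C')) || (c == (some 'C', some 'G'))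
def pvIsGU (c : Option Char × Option Char) : Bool :=
  (c == (some 'G', some 'U')) || (c == (some 'U', some 'G'))

def type_pairs (pairs : List (Int × Int)) (sequence : String) : (List (Int × Int)) × (List (Int × Int)) × (List (Int × Int)) :=
  let seq := sequence.toList.map PySem.Chars.upperChar
  let r := pairs.foldl
    (fun (acc : List (Int × Int) × List (Int × Int) × List (Int × Int) × List (Int × Int)) i =>
      let c := pvGet2 seq i
      if pvIsAU c then (acc.1 ++ [i], acc.2.1, acc.2.2.1, acc.2.2.2)
      else if pvIsGC c then (acc.1, acc.2.1 ++ [i], acc.2.2.1, acc.2.2.2)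
      else if pvIsGU c then (acc.1, acc.2.1, acc.2.2.1 ++ [i], acc.2.2.2)
      else (acc.1, acc.2.1, acc.2.2.1, acc.2.2.2 ++ [i]))
    ([], [], [], [])
  (r.1 ++ r.2.1, r.2.2.1, r.2.2.2)

-- ===== PORT B =====
def type_pairs_alt (pairs : List (Int × Int)) (sequence : String) : (List (Int × Int)) × (List (Int × Int)) × (List (Int × Int)) :=
  let seq := (PySem.Str.upper sequence).toList
  let au := pairs.filter (fun p => pvIsAU (pvGet2 seq p))
  let gc := pairs.filter (fun p => pvIsGC (pvGet2 seq p))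
  let gu := pairs.filter (fun p => pvIsGU (pvGet2 seq p))
  let other := pairs.filter
    (fun p => !(pvIsAU (pvGet2 seq p) || pvIsGC (pvGet2 seq p) || pvIsGU (pvGet2 seq p)))
  (au ++ gc, gu, other)

-- ===== PRECONDITION & SPEC =====
-- Pre_ excludes exactly the inputs where the Python raises IndexError: every index p[k]-1 must be a valid Python index of the sequence.
def Pre_type_pairs (pairs : List (Int × Int)) (sequence : String) : Prop :=
  ∀ p ∈ pairs, PySem.Raise.InRange sequence.toList.length (p.1 - 1) ∧
               PySem.Raise.InRange sequence.toList.length (p.2 - 1)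
instance (pairs : List (Int × Int)) (sequence : String) : Decidable (Pre_type_pairs pairs sequence) := by unfold Pre_type_pairs; infer_instance
def pvWitness_type_pairs : (List (Int × Int)) × String := ([(1, 2), (2, 1), (1, 1)], "au")

def Spec_type_pairs (pairs : List (Int × Int)) (sequence : String) (out : (List (Int × Int)) × (List (Int × Int)) × (List (Int × Int))) : Prop := out = type_pairs_alt pairs sequence
instance (pairs : List (Int × Int)) (sequence : String) (out : (List (Int × Int)) × (List (Int × Int)) × (List (Int × Int))) : Decidable (Spec_type_pairs pairs sequence out) := by unfold Spec_type_pairs; infer_instance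

-- ===== CLAIM (what is proved, stated in full; the proofs are below) =====
def Claim_equal_type_pairs : Prop := ∀ (pairs : List (Int × Int)) (sequence : String), Dom_type_pairs pairs sequence → Pre_type_pairs pairs sequence → Spec_type_pairs pairs sequence (type_pairs pairs sequence)

-- ===== LEMMAS AND PROOFS =====

theorem pvAU_not_GC {c : Option Char × Option Char} (h : pvIsAU c = true) : pvIsGC c = false := by
  simp only [pvIsAU, Bool.or_eq_true, beq_iff_eq] at h
  rcases h with h | h <;> subst h <;> rfl

theorem pvAU_not_GU {c : Option Char × Option Char} (h : pvIsAU c = true) : pvIsGU c = false := by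
  simp only [pvIsAU, Bool.or_eq_true, beq_iff_eq] at h
  rcases h with h | h <;> subst h <;> rfl

theorem pvGC_not_GU {c : Option Char × Option Char} (h : pvIsGC c = true) : pvIsGU c = false := by
  simp only [pvIsGC, Bool.or_eq_true, beq_iff_eq] at h
  rcases h with h | h <;> subst h <;> rfl

-- A's loop computes, for any starting accumulator, the four nested-condition filters appended
theorem pvLoop_eq (seq : List Char) (l : List (Int × Int))
    (au gc gu ot : List (Int × Int)) :
    l.foldl
      (fun (acc : List (Int × Int) × List (Int × Int) × List (Int × Int) × List (Int × Int)) i =>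
        let c := pvGet2 seq i
        if pvIsAU c then (acc.1 ++ [i], acc.2.1, acc.2.2.1, acc.2.2.2)
        else if pvIsGC c then (acc.1, acc.2.1 ++ [i], acc.2.2.1, acc.2.2.2)
        else if pvIsGU c then (acc.1, acc.2.1, acc.2.2.1 ++ [i], acc.2.2.2)
        else (acc.1, acc.2.1, acc.2.2.1, acc.2.2.2 ++ [i]))
      (au, gc, gu, ot)
    = (au ++ l.filter (fun p => pvIsAU (pvGet2 seq p)),
       gc ++ l.filter (fun p => !pvIsAU (pvGet2 seq p) && pvIsGC (pvGet2 seq p)),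
       gu ++ l.filter (fun p => !pvIsAU (pvGet2 seq p) && !pvIsGC (pvGet2 seq p) && pvIsGU (pvGet2 seq p)),
       ot ++ l.filter (fun p => !pvIsAU (pvGet2 seq p) && !pvIsGC (pvGet2 seq p) && !pvIsGU (pvGet2 seq p))) := by
  induction l generalizing au gc gu ot with
  | nil => simp
  | cons i t ih =>
    by_cases h1 : pvIsAU (pvGet2 seq i) = true
    · simp [h1, ih, List.append_assoc]
    · by_cases h2 : pvIsGC (pvGet2 seq i) = true
      · simp [h1, h2, ih, List.append_assoc]
      · by_cases h3 : pvIsGU (pvGet2 seq i) = true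
        · simp [h1, h2, h3, ih, List.append_assoc]
        · simp [h1, h2, h3, ih, List.append_assoc]

-- the three classifying predicates are pairwise exclusive, so the nested filters equal B's flat ones
theorem pvFilter_GC (seq : List Char) (l : List (Int × Int)) :
    l.filter (fun p => !pvIsAU (pvGet2 seq p) && pvIsGC (pvGet2 seq p))
      = l.filter (fun p => pvIsGC (pvGet2 seq p)) := by
  apply List.filter_congr
  intro p _
  by_cases h : pvIsGC (pvGet2 seq p) = true
  · have : pvIsAU (pvGet2 seq p) = false := by
      by_contra hc
      simp only [Bool.not_eq_false] at hc
      simp [pvAU_not_GC hc] at h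
    simp [h, this]
  · simp at h; simp [h]

theorem pvFilter_GU (seq : List Char) (l : List (Int × Int)) :
    l.filter (fun p => !pvIsAU (pvGet2 seq p) && !pvIsGC (pvGet2 seq p) && pvIsGU (pvGet2 seq p))
      = l.filter (fun p => pvIsGU (pvGet2 seq p)) := by
  apply List.filter_congr
  intro p _
  by_cases h : pvIsGU (pvGet2 seq p) = true
  · have hau : pvIsAU (pvGet2 seq p) = false := by
      by_contra hc
      simp only [Bool.not_eq_false] at hc
      simp [pvAU_not_GU hc] at h
    have hgc : pvIsGC (pvGet2 seq p) = false := by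
      by_contra hc
      simp only [Bool.not_eq_false] at hc
      simp [pvGC_not_GU hc] at h
    simp [h, hau, hgc]
  · simp at h; simp [h]

theorem pvFilter_other (seq : List Char) (l : List (Int × Int)) :
    l.filter (fun p => !pvIsAU (pvGet2 seq p) && !pvIsGC (pvGet2 seq p) && !pvIsGU (pvGet2 seq p))
      = l.filter (fun p => !(pvIsAU (pvGet2 seq p) || pvIsGC (pvGet2 seq p) || pvIsGU (pvGet2 seq p))) := by
  apply List.filter_congr
  intro p _
  cases pvIsAU (pvGet2 seq p) <;> cases pvIsGC (pvGet2 seq p) <;> cases pvIsGU (pvGet2 seq p) <;> rfl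

theorem pvUpper_toList (s : String) :
    (PySem.Str.upper s).toList = s.toList.map PySem.Chars.upperChar := by
  simp [PySem.Str.toList_upper, PySem.Chars.upper]

-- ===== VERDICT (by name: the statement is the Claim_ definition above) =====
theorem type_pairs_spec : Claim_equal_type_pairs := by
  intro pairs sequence _ _
  show type_pairs pairs sequence = type_pairs_alt pairs sequence
  simp only [type_pairs, type_pairs_alt, pvUpper_toList]
  rw [pvLoop_eq, pvFilter_GC, pvFilter_GU, pvFilter_other]
  simp
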